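-- pv_equiv track=rewrite | github.com/Xinglab/ProteoSeq | scripts/predict_orf.py | lower_ss
-- ===== SOURCE A (Python) =====
-- def lower_ss(seq, pos_s0_list):
--     if len(pos_s0_list)==0:
--         return seq
--     for pos_s0 in pos_s0_list:
--         if 0 <= pos_s0 < len(seq):
--             temp_seq = seq[:pos_s0] + seq[pos_s0].lower() + seq[pos_s0+1:]
--             seq = temp_seq
--     return seq
-- ===== SOURCE B (Python) =====
-- def lower_ss(seq, pos_s0_list):
--     valid = {p for p in pos_s0_list if 0 <= p < len(seq)}
--     return ''.join(c.lower() if i in valid else c for i, c in enumerate(seq))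
-- ===== Notes on version B (the rewrite author's own statement) =====
-- stated objective: idiomatic
-- what changed: B builds the set of in-range positions once and makes a single pass over the string's characters with enumerate/join, instead of A's loop over positions that rebuilds the whole string by slicing at every position.
import Mathlib
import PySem

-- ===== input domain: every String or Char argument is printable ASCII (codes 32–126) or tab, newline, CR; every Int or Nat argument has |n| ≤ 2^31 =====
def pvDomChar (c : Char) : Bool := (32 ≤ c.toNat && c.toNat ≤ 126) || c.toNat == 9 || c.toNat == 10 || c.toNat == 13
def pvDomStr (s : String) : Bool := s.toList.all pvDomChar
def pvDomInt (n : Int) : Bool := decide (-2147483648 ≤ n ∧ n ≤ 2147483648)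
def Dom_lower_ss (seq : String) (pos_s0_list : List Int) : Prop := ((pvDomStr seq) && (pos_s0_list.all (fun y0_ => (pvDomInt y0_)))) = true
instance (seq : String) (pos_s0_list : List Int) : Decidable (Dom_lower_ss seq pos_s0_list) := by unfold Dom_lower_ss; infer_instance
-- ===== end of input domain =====

-- B replaces A's per-position string rebuilding by one pass over the characters with a precomputed
-- set of in-range positions (idiomatic single pass; asymptotically fewer character copies).

-- ===== PORT A =====
-- loop body of A: if 0 <= pos_s0 < len(seq): seq = seq[:pos_s0] + seq[pos_s0].lower() + seq[pos_s0+1:]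
def pvStepA (cs : List Char) (p : Int) : List Char :=
  if 0 ≤ p ∧ p < PySem.List.len cs then
    PySem.List.slice cs none (some p) ++ PySem.Chars.lower [PySem.List.pyGetD cs p ' ']
      ++ PySem.List.slice cs (some (p + 1)) none
  else cs

def lower_ss (seq : String) (pos_s0_list : List Int) : String :=
  if PySem.List.len pos_s0_list = 0 then seq
  else String.ofList (pos_s0_list.foldl pvStepA seq.toList)

-- ===== PORT B =====
def lower_ss_alt (seq : String) (pos_s0_list : List Int) : String :=
  let cs := seq.toList
  let valid : PySem.Set Int :=
    PySem.Set.ofList (pos_s0_list.filter (fun p => decide (0 ≤ p) && decide (p < PySem.List.len cs)))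
  String.ofList ((PySem.List.enumerate cs 0).map
    (fun ic => if PySem.Set.contains valid ic.1 then PySem.Chars.lowerChar ic.2 else ic.2))

-- ===== PRECONDITION & SPEC =====
def Spec_lower_ss (seq : String) (pos_s0_list : List Int) (out : String) : Prop := out = lower_ss_alt seq pos_s0_list
instance (seq : String) (pos_s0_list : List Int) (out : String) : Decidable (Spec_lower_ss seq pos_s0_list out) := by unfold Spec_lower_ss; infer_instance

-- ===== CLAIM (what is proved, stated in full; the proofs are below) =====
def Claim_equal_lower_ss : Prop := ∀ (seq : String) (pos_s0_list : List Int), Dom_lower_ss seq pos_s0_list → Spec_lower_ss seq pos_s0_list (lower_ss seq pos_s0_list)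

-- ===== LEMMAS AND PROOFS =====

theorem lowerChar_idem (c : Char) :
    PySem.Chars.lowerChar (PySem.Chars.lowerChar c) = PySem.Chars.lowerChar c := by
  simp only [PySem.Chars.lowerChar, PySem.Chars.isupper]
  split_ifs with h1 h2 <;> try rfl
  exfalso
  simp only [Bool.and_eq_true, decide_eq_true_eq, Char.le_def, UInt32.le_iff_toNat_le] at h1 h2
  have hA : ('A' : Char).val.toNat = 65 := rfl
  have hZ : ('Z' : Char).val.toNat = 90 := rfl
  rw [hA, hZ] at h1 h2
  have hv : (c.toNat + 32).isValidChar := by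
    left; have : c.toNat = c.val.toNat := rfl; omega
  have hofs : (Char.ofNat (c.toNat + 32)).val.toNat = c.toNat + 32 := by
    have := Char.toNat_ofNat (c.toNat + 32)
    simp [hv] at this
    exact this
  rw [hofs] at h2
  have : c.toNat = c.val.toNat := rfl
  omega

theorem pvStepA_eq_set (cs : List Char) (p : Int) :
    pvStepA cs p =
      if h : 0 ≤ p ∧ p < (cs.length : Int) then
        cs.set p.toNat (PySem.Chars.lowerChar (cs[p.toNat]'(by omega)))
      else cs := by
  unfold pvStepA
  by_cases h : 0 ≤ p ∧ p < (cs.length : Int)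
  · obtain ⟨h0, hl⟩ := h
    have hlt : p.toNat < cs.length := by omega
    rw [if_pos (by simpa [PySem.List.len_eq] using ⟨h0, hl⟩), dif_pos ⟨h0, hl⟩]
    rw [PySem.List.slice_to cs h0, PySem.List.slice_from cs (by omega)]
    rw [PySem.List.pyGetD_eq_getElem cs ' ' h0 (by simpa [PySem.List.len_eq] using hl)]
    have hp1 : (p + 1).toNat = p.toNat + 1 := by omega
    rw [hp1, List.set_eq_take_append_cons_drop, if_pos hlt]
    simp [PySem.Chars.lower]
  · rw [if_neg (by simpa [PySem.List.len_eq] using h), dif_neg h]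

theorem foldA_length (ps : List Int) (cs : List Char) :
    (ps.foldl pvStepA cs).length = cs.length := by
  induction ps generalizing cs with
  | nil => rfl
  | cons p ps ih =>
    rw [List.foldl_cons, ih, pvStepA_eq_set]
    split <;> simp

theorem foldA_getElem? (ps : List Int) (cs : List Char) (i : Nat) (hi : i < cs.length) :
    (ps.foldl pvStepA cs)[i]? =
      some (if (i : Int) ∈ ps then PySem.Chars.lowerChar (cs[i]'hi) else cs[i]'hi) := by
  induction ps generalizing cs with
  | nil => simp [List.getElem?_eq_getElem hi]
  | cons p ps ih =>
    rw [List.foldl_cons]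
    have hi' : i < (pvStepA cs p).length := by
      rw [pvStepA_eq_set]; split <;> simpa
    rw [ih (pvStepA cs p) hi']
    have hstep : (pvStepA cs p)[i]? =
        some (if p = (i : Int) then PySem.Chars.lowerChar (cs[i]'hi) else cs[i]'hi) := by
      rw [pvStepA_eq_set]
      by_cases h : 0 ≤ p ∧ p < (cs.length : Int)
      · rw [dif_pos h]
        rw [List.getElem?_eq_getElem (by simpa using hi)]
        rw [List.getElem_set]
        by_cases hp : p = (i : Int)
        · simp [hp]
        · have hpn : p.toNat ≠ i := by omega
          simp [hpn, hp]
      · rw [dif_neg h]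
        rw [List.getElem?_eq_getElem hi]
        have hp : p ≠ (i : Int) := by
          intro he; exact h (by constructor <;> omega)
        simp [hp]
    have hv : (pvStepA cs p)[i]'hi' =
        if p = (i : Int) then PySem.Chars.lowerChar (cs[i]'hi) else cs[i]'hi := by
      rw [List.getElem?_eq_getElem hi'] at hstep
      exact Option.some.inj hstep
    rw [hv]
    by_cases hp : p = (i : Int) <;> by_cases hm : (i : Int) ∈ ps
    · simp [List.mem_cons, hp, hm, lowerChar_idem]
    · simp [List.mem_cons, hp, hm]
    · simp [List.mem_cons, hp, hm]
    · have hp' : ¬ (i : Int) = p := fun he => hp he.symm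
      simp [List.mem_cons, hp', hp, hm]

theorem lists_eq (cs : List Char) (ps : List Int) :
    ps.foldl pvStepA cs =
      (PySem.List.enumerate cs 0).map
        (fun ic => if PySem.Set.contains
            (PySem.Set.ofList (ps.filter (fun p => decide (0 ≤ p) && decide (p < PySem.List.len cs))))
            ic.1 then PySem.Chars.lowerChar ic.2 else ic.2) := by
  apply List.ext_getElem?
  intro i
  by_cases hi : i < cs.length
  · rw [foldA_getElem? ps cs i hi]
    rw [List.getElem?_map, PySem.List.getElem?_enumerate]
    rw [List.getElem?_eq_getElem hi]
    simp only [Option.map_some, zero_add]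
    have hcont : PySem.Set.contains
        (PySem.Set.ofList (ps.filter (fun p => decide (0 ≤ p) && decide (p < PySem.List.len cs))))
        (i : Int) = decide ((i : Int) ∈ ps) := by
      simp only [PySem.Set.contains]
      by_cases hm : (i : Int) ∈ ps <;> simp [hm, hi]
    rw [hcont]
    by_cases hm : (i : Int) ∈ ps <;> simp [hm]
  · rw [List.getElem?_eq_none (by rw [foldA_length]; omega),
        List.getElem?_eq_none (by simp [PySem.List.length_enumerate]; omega)]

-- ===== VERDICT (by name: the statement is the Claim_ definition above) =====
theorem lower_ss_spec : Claim_equal_lower_ss := by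
  intro seq ps _
  unfold Spec_lower_ss
  simp only [lower_ss, lower_ss_alt]
  rw [← lists_eq seq.toList ps]
  by_cases h : PySem.List.len ps = 0
  · have hnil : ps = [] := by simpa [PySem.List.len_eq] using h
    subst hnil
    simp [String.ofList_toList]
  · rw [if_neg h]
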